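-- pv_equiv track=rewrite | github.com/lakshman81-ai/Pcf-fixer-Real2-3-3 | deduplicate.py | deduplicate_decl
-- ===== SOURCE A (Python) =====
-- def deduplicate_decl(text, var_name):
--     lines = text.split('\n')
--     out = []
--     seen = set()
--     for line in lines:
--         if var_name in line and "const " in line and "=" in line:
--             if line.strip() in seen:
--                 continue
--             seen.add(line.strip())
--         out.append(line)
--         # reset seen per component definition. we can guess by `const ` block end
--         if line.strip() == "};" or line.strip() == "return (":
--             seen.clear()
--     return '\n'.join(out)
-- ===== SOURCE B (Python) =====
-- def _is_decl(line, var_name):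
--     return var_name in line and "const " in line and "=" in line
--
--
-- def deduplicate_decl(text, var_name):
--     lines = text.split('\n')
--     # group the lines into blocks: a line stripping to "};" or "return (" ends its block
--     blocks = []
--     cur = []
--     for line in lines:
--         cur.append(line)
--         if line.strip() in ("};", "return ("):
--             blocks.append(cur)
--             cur = []
--     if cur:
--         blocks.append(cur)
--     # within each block, keep a const declaration only if no already-kept
--     # declaration of the block has the same stripped form
--     out = []
--     for block in blocks:
--         kept = []
--         for line in block:
--             if _is_decl(line, var_name) and any(
--                     _is_decl(p, var_name) and p.strip() == line.strip() for p in kept):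
--                 continue
--             kept.append(line)
--         out.extend(kept)
--     return '\n'.join(out)
-- ===== Notes on version B (the rewrite author's own statement) =====
-- stated objective: alternative
-- what changed: A is a single stateful pass whose seen-set is reset in place at block terminators; B first partitions the lines into explicit blocks ending at '};' / 'return (' lines, then dedups each block independently by a look-back over the block's already-kept lines (no auxiliary seen-set), and concatenates.
import Mathlib
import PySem

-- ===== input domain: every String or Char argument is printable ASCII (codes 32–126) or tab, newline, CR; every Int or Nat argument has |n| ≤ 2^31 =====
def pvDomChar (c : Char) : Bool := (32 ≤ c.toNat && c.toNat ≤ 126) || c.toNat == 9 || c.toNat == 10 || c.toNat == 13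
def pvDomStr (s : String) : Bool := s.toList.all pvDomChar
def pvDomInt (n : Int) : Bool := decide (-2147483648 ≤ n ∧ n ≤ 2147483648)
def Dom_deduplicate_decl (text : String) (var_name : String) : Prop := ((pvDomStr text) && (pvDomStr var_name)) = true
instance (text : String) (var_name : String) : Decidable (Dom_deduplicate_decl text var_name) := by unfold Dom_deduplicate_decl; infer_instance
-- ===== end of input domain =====

-- B replaces A's single reset-in-place loop by an explicit group-into-blocks-then-dedup-each-block
-- pipeline (alternative decomposition; return value proved identical, no speed claim).

-- ===== PORT A =====
-- A's single loop: the emitted lines are returned, seen is the running set,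
-- cleared after emitting a line whose strip is "};" or "return ("
def aLoop (var_name : String) : List String → PySem.Set String → List String
  | [], _ => []
  | line :: rest, seen =>
    if (PySem.Str.isIn var_name line && PySem.Str.isIn "const " line && PySem.Str.isIn "=" line)
        && PySem.Set.contains seen (PySem.Str.strip line) then
      aLoop var_name rest seen
    else
      line :: aLoop var_name rest
        (if PySem.Str.strip line == "};" || PySem.Str.strip line == "return (" then PySem.Set.empty
         else if PySem.Str.isIn var_name line && PySem.Str.isIn "const " line && PySem.Str.isIn "=" line
              then PySem.Set.add seen (PySem.Str.strip line) else seen)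

def deduplicate_decl (text : String) (var_name : String) : String :=
  PySem.Str.join "\n" (aLoop var_name ((PySem.Str.split? text "\n").getD []) PySem.Set.empty)

-- ===== PORT B =====
def bIsDecl (line : String) (var_name : String) : Bool :=
  PySem.Str.isIn var_name line && PySem.Str.isIn "const " line && PySem.Str.isIn "=" line

def bIsTerm (line : String) : Bool :=
  PySem.Str.strip line == "};" || PySem.Str.strip line == "return ("

-- Source B's first loop: accumulate cur, flush it (terminator included) into blocks at each terminator
def bBlocksLoop : List String → List (List String) → List String → List (List String) × List String
  | [], blocks, cur => (blocks, cur)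
  | line :: rest, blocks, cur =>
    if bIsTerm line then bBlocksLoop rest (blocks ++ [cur ++ [line]]) []
    else bBlocksLoop rest blocks (cur ++ [line])

def bBlocks (lines : List String) : List (List String) :=
  let p := bBlocksLoop lines [] []
  if p.2 ≠ [] then p.1 ++ [p.2] else p.1

-- Source B's inner loop: keep a line unless it is a declaration duplicating an already-kept declaration
def bDedupStep (var_name : String) (kept : List String) (line : String) : List String :=
  if bIsDecl line var_name &&
      kept.any (fun p => bIsDecl p var_name && (PySem.Str.strip p == PySem.Str.strip line)) then
    kept
  else kept ++ [line]

def bDedupBlock (var_name : String) (block : List String) : List String :=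
  block.foldl (bDedupStep var_name) []

def deduplicate_decl_alt (text : String) (var_name : String) : String :=
  PySem.Str.join "\n"
    ((bBlocks ((PySem.Str.split? text "\n").getD [])).foldl
      (fun out b => out ++ bDedupBlock var_name b) [])

-- ===== PRECONDITION & SPEC =====
def Spec_deduplicate_decl (text : String) (var_name : String) (out : String) : Prop := out = deduplicate_decl_alt text var_name
instance (text : String) (var_name : String) (out : String) : Decidable (Spec_deduplicate_decl text var_name out) := by unfold Spec_deduplicate_decl; infer_instance

-- ===== CLAIM (what is proved, stated in full; the proofs are below) =====
def Claim_equal_deduplicate_decl : Prop := ∀ (text : String) (var_name : String), Dom_deduplicate_decl text var_name → Spec_deduplicate_decl text var_name (deduplicate_decl text var_name)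

-- ===== LEMMAS AND PROOFS =====

-- a non-space character of a line survives strip
theorem mem_dropWhile_isspace {c : Char} {cs : List Char}
    (hm : c ∈ cs) (hs : PySem.Chars.isspace c = false) :
    c ∈ cs.dropWhile PySem.Chars.isspace := by
  have hsplit := List.takeWhile_append_dropWhile (p := PySem.Chars.isspace) (l := cs)
  rw [← hsplit] at hm
  rcases List.mem_append.mp hm with h | h
  · exact absurd (List.mem_takeWhile_imp h) (by simp [hs])
  · exact h

theorem mem_strip_of_not_space {c : Char} {cs : List Char}
    (hm : c ∈ cs) (hs : PySem.Chars.isspace c = false) :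
    c ∈ PySem.Chars.strip cs := by
  unfold PySem.Chars.strip PySem.Chars.rstrip PySem.Chars.lstrip
  have h1 : c ∈ cs.dropWhile PySem.Chars.isspace := mem_dropWhile_isspace hm hs
  have h2 : c ∈ (cs.dropWhile PySem.Chars.isspace).reverse := List.mem_reverse.mpr h1
  exact List.mem_reverse.mpr (mem_dropWhile_isspace h2 hs)

-- a terminator line ("};" / "return (" up to whitespace) contains no '=' hence is never a declaration
theorem term_no_eq {line : String} (ht : bIsTerm line = true) :
    PySem.Str.isIn "=" line = false := by
  by_contra h
  rw [Bool.not_eq_false] at h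
  obtain ⟨s, t, hst⟩ := (PySem.Str.isIn_iff_infix _ _).mp h
  have hmem : '=' ∈ line.toList := by
    rw [← hst]; simp
  have hstrip : '=' ∈ PySem.Chars.strip line.toList :=
    mem_strip_of_not_space hmem (by decide)
  unfold bIsTerm at ht
  rw [Bool.or_eq_true] at ht
  rcases ht with h2 | h2
  · have h3 := congrArg String.toList (eq_of_beq h2)
    rw [PySem.Str.toList_strip] at h3
    rw [h3] at hstrip
    simp at hstrip
  · have h3 := congrArg String.toList (eq_of_beq h2)
    rw [PySem.Str.toList_strip] at h3
    rw [h3] at hstrip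
    simp at hstrip

theorem term_not_decl {line var_name : String} (ht : bIsTerm line = true) :
    bIsDecl line var_name = false := by
  unfold bIsDecl
  rw [term_no_eq ht]
  simp

theorem contains_false_of_not_mem {s : PySem.Set String} {y : String} (h : y ∉ s) :
    PySem.Set.contains s y = false := by
  cases hc : PySem.Set.contains s y
  · rfl
  · exact absurd ((PySem.Set.contains_iff s y).mp hc) h

theorem set_contains_add (s : PySem.Set String) (x k : String) :
    PySem.Set.contains (PySem.Set.add s x) k = (PySem.Set.contains s k || x == k) := by
  by_cases hm : k ∈ PySem.Set.add s x
  · rw [(PySem.Set.contains_iff _ _).mpr hm]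
    rcases (PySem.Set.mem_add s x k).mp hm with h | h
    · rw [(PySem.Set.contains_iff _ _).mpr h]; rfl
    · subst h
      simp
  · have hns : k ∉ s := fun h => hm ((PySem.Set.mem_add s x k).mpr (Or.inl h))
    have hnx : ¬ k = x := fun h => hm ((PySem.Set.mem_add s x k).mpr (Or.inr h))
    rw [contains_false_of_not_mem hm, contains_false_of_not_mem hns]
    simp [Ne.symm hnx]

-- reference loop: A's algorithm with the seen-set replaced by the look-back over the block's kept lines
def rLoop (var_name : String) : List String → List String → List String
  | [], _ => []
  | line :: rest, kept =>
    if bIsDecl line var_name &&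
        kept.any (fun p => bIsDecl p var_name && (PySem.Str.strip p == PySem.Str.strip line)) then
      rLoop var_name rest kept
    else
      line :: rLoop var_name rest (if bIsTerm line then [] else kept ++ [line])

-- A's loop equals the reference loop whenever seen holds exactly the strips of kept declarations
theorem aLoop_eq_rLoop (var_name : String) (lines : List String) :
    ∀ (seen : PySem.Set String) (kept : List String),
    (∀ k, PySem.Set.contains seen k
        = kept.any (fun p => bIsDecl p var_name && (PySem.Str.strip p == k))) →
    aLoop var_name lines seen = rLoop var_name lines kept := by
  induction lines with
  | nil => intro seen kept _; rfl
  | cons line rest ih =>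
    intro seen kept hinv
    rw [aLoop, rLoop]
    rw [show (PySem.Str.isIn var_name line && PySem.Str.isIn "const " line && PySem.Str.isIn "=" line)
        = bIsDecl line var_name from rfl]
    rw [show (PySem.Str.strip line == "};" || PySem.Str.strip line == "return (") = bIsTerm line from rfl]
    rw [hinv (PySem.Str.strip line)]
    by_cases hskip : (bIsDecl line var_name &&
        kept.any (fun p => bIsDecl p var_name && (PySem.Str.strip p == PySem.Str.strip line))) = true
    · rw [if_pos hskip, if_pos hskip]
      exact ih seen kept hinv
    · rw [if_neg hskip, if_neg hskip]
      congr 1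
      by_cases hterm : bIsTerm line = true
      · rw [if_pos hterm, if_pos hterm]
        exact ih _ _ (fun k => by simp [PySem.Set.empty, PySem.Set.contains_eq_listContains])
      · rw [if_neg hterm, if_neg hterm]
        by_cases hdecl : bIsDecl line var_name = true
        · rw [if_pos hdecl]
          refine ih _ _ (fun k => ?_)
          rw [set_contains_add, hinv k]
          simp [hdecl]
        · rw [if_neg hdecl]
          refine ih _ _ (fun k => ?_)
          rw [hinv k]
          simp [hdecl]

-- recursive characterisation of Source B's grouping loop
def splitRec : List String → List (List String)
  | [] => []
  | l :: ls =>
    if bIsTerm l then [l] :: splitRec ls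
    else match splitRec ls with
      | [] => [[l]]
      | b :: bs => (l :: b) :: bs

def consHead (cur : List String) : List (List String) → List (List String)
  | [] => if cur = [] then [] else [cur]
  | b :: bs => (cur ++ b) :: bs

theorem splitRec_nil_iff {ls : List String} (hs : splitRec ls = []) : ls = [] := by
  cases ls with
  | nil => rfl
  | cons a b =>
    rw [splitRec] at hs
    by_cases h : bIsTerm a = true
    · rw [if_pos h] at hs; cases hs
    · rw [if_neg h] at hs
      cases h2 : splitRec b <;> rw [h2] at hs <;> cases hs

theorem bBlocksLoop_eq (lines : List String) :
    ∀ (blocks : List (List String)) (cur : List String),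
    (if (bBlocksLoop lines blocks cur).2 ≠ [] then
       (bBlocksLoop lines blocks cur).1 ++ [(bBlocksLoop lines blocks cur).2]
     else (bBlocksLoop lines blocks cur).1)
    = blocks ++ consHead cur (splitRec lines) := by
  induction lines with
  | nil =>
    intro blocks cur
    by_cases h : cur = []
    · subst h; simp [bBlocksLoop, splitRec, consHead]
    · simp [bBlocksLoop, splitRec, consHead, h]
  | cons l ls ih =>
    intro blocks cur
    rw [bBlocksLoop, splitRec]
    by_cases ht : bIsTerm l = true
    · rw [if_pos ht, if_pos ht, ih]
      cases hsl : splitRec ls <;> simp [consHead]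
    · rw [if_neg ht, if_neg ht, ih]
      cases hs : splitRec ls with
      | nil =>
        have : ls = [] := splitRec_nil_iff hs
        subst this
        by_cases hc : cur = []
        · subst hc; simp [consHead]
        · simp [consHead, hc]
      | cons b bs =>
        by_cases hc : cur = []
        · subst hc; simp [consHead]
        · simp [consHead]

-- continuation form of B's dedup over blocks, with the first block already partially processed
def dedupCont (var_name : String) (kept : List String) : List (List String) → List String
  | [] => kept
  | b :: bs => b.foldl (bDedupStep var_name) kept ++ bs.flatMap (bDedupBlock var_name)

theorem dedupCont_nil (var_name : String) (blocks : List (List String)) :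
    dedupCont var_name [] blocks = blocks.flatMap (bDedupBlock var_name) := by
  cases blocks with
  | nil => rfl
  | cons b bs => rfl

-- the reference loop computes B's per-block dedup of the blocks
theorem rLoop_eq_dedupCont (var_name : String) (lines : List String) :
    ∀ (kept : List String),
    kept ++ rLoop var_name lines kept = dedupCont var_name kept (splitRec lines) := by
  induction lines with
  | nil => intro kept; simp [rLoop, splitRec, dedupCont]
  | cons line rest ih =>
    intro kept
    rw [rLoop, splitRec]
    by_cases hskip : (bIsDecl line var_name &&
        kept.any (fun p => bIsDecl p var_name && (PySem.Str.strip p == PySem.Str.strip line))) = true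
    · rw [if_pos hskip]
      have hterm : bIsTerm line = false := by
        cases h2 : bIsTerm line
        · rfl
        · have := term_not_decl (var_name := var_name) h2
          rw [this] at hskip
          simp at hskip
      have hterm2 : ¬ bIsTerm line = true := by simp [hterm]
      rw [if_neg hterm2]
      cases hs : splitRec rest with
      | nil =>
        have : rest = [] := splitRec_nil_iff hs
        subst this
        simp [rLoop, dedupCont, bDedupStep, hskip]
      | cons b bs =>
        have h := ih kept
        rw [hs] at h
        rw [h]
        simp [dedupCont, bDedupStep, hskip]
    · rw [if_neg hskip]
      by_cases hterm : bIsTerm line = true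
      · rw [if_pos hterm, if_pos hterm]
        have h := ih ([] : List String)
        simp only [List.nil_append] at h
        rw [show kept ++ line :: rLoop var_name rest []
            = (kept ++ [line]) ++ rLoop var_name rest [] by simp]
        rw [h, dedupCont_nil]
        simp [dedupCont, bDedupStep, hskip]
      · have hterm' : bIsTerm line = false := by
          cases h2 : bIsTerm line
          · rfl
          · exact absurd h2 hterm
        rw [if_neg hterm, if_neg hterm]
        cases hs : splitRec rest with
        | nil =>
          have : rest = [] := splitRec_nil_iff hs
          subst this
          simp [rLoop, dedupCont, bDedupStep, hskip]
        | cons b bs =>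
          have h := ih (kept ++ [line])
          rw [hs] at h
          rw [show kept ++ line :: rLoop var_name rest (kept ++ [line])
              = (kept ++ [line]) ++ rLoop var_name rest (kept ++ [line]) by simp]
          rw [h]
          simp [dedupCont, bDedupStep, hskip]

-- ===== VERDICT (by name: the statement is the Claim_ definition above) =====
theorem deduplicate_decl_spec : Claim_equal_deduplicate_decl := by
  intro text var_name _
  unfold Spec_deduplicate_decl deduplicate_decl deduplicate_decl_alt
  congr 1
  have h1 : aLoop var_name ((PySem.Str.split? text "\n").getD []) PySem.Set.empty
      = rLoop var_name ((PySem.Str.split? text "\n").getD []) [] := by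
    refine aLoop_eq_rLoop var_name _ _ _ (fun k => ?_)
    simp [PySem.Set.empty, PySem.Set.contains_eq_listContains]
  have h2 := rLoop_eq_dedupCont var_name ((PySem.Str.split? text "\n").getD []) []
  simp only [List.nil_append] at h2
  have h3 : bBlocks ((PySem.Str.split? text "\n").getD [])
      = splitRec ((PySem.Str.split? text "\n").getD []) := by
    unfold bBlocks
    have h := bBlocksLoop_eq ((PySem.Str.split? text "\n").getD []) [] []
    simp only [List.nil_append] at h
    rw [show consHead [] (splitRec ((PySem.Str.split? text "\n").getD []))
        = splitRec ((PySem.Str.split? text "\n").getD []) by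
      cases splitRec ((PySem.Str.split? text "\n").getD []) <;> simp [consHead]] at h
    exact h
  rw [h1, h2, dedupCont_nil, h3,
    PySem.List.foldl_append_eq_flatMap (bDedupBlock var_name) _ []]
  simp
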